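-- pv_equiv track=rewrite | github.com/albertyw/factorio-dependency-tree | science_pack.py | traverse_list
-- ===== SOURCE A (Python) =====
-- def get_dependencies(recipe, recipes):
--     if recipe == 'solid-fuel':
--         return ['heavy-oil', 'light-oil', 'petroleum-gas']
--     return recipes.get(recipe, [])
--
-- def traverse_list(recipe, recipes, data):
--     dependencies = get_dependencies(recipe, recipes)
--     data.append([recipe] + dependencies)
--     for dependency in dependencies:
--         if dependency in [d[0] for d in data]:
--             continue
--         data = traverse_list(dependency, recipes, data)
--     return data
-- ===== SOURCE B (Python) =====
-- def get_dependencies(recipe, recipes):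
--     if recipe == 'solid-fuel':
--         return ['heavy-oil', 'light-oil', 'petroleum-gas']
--     return recipes.get(recipe, [])
--
-- def traverse_list(recipe, recipes, data):
--     # Iterative DFS with an explicit stack and an O(1) visited set seeded from
--     # the current row heads; the root row is appended unconditionally.
--     dependencies = get_dependencies(recipe, recipes)
--     data.append([recipe] + dependencies)
--     if not dependencies:
--         return data
--     seen = {row[0] for row in data}
--     stack = dependencies[::-1]
--     while stack:
--         name = stack.pop()
--         if name in seen:
--             continue
--         subdeps = get_dependencies(name, recipes)
--         data.append([name] + subdeps)
--         seen.add(name)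
--         stack.extend(reversed(subdeps))
--     return data
-- ===== Notes on version B (the rewrite author's own statement) =====
-- stated objective: alternative
-- what changed: The recursive DFS with a per-check linear scan of row heads is replaced by an iterative loop over an explicit stack with an O(1) visited set seeded once from the row heads; children are pushed reversed and the skip decided at pop time, reproducing the exact row order.
import Mathlib
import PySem

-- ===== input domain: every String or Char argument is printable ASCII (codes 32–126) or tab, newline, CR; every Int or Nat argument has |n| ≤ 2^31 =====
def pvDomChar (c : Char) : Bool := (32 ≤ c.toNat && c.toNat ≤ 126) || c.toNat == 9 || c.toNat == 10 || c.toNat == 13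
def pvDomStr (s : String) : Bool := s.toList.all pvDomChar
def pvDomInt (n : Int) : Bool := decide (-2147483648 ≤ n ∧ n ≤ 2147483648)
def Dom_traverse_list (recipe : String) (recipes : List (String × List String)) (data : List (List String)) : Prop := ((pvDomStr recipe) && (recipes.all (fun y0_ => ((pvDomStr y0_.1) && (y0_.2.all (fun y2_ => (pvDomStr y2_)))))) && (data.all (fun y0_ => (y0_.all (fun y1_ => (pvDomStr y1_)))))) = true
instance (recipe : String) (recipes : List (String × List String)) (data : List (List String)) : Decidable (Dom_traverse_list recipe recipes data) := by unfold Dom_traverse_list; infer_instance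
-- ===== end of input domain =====

-- B replaces A's recursion + per-check list scan by an iterative explicit-stack DFS with a seeded visited set (same values, same row order); both mutate `data` in Python identically, the theorems are about the return value.


-- ===== PORT A =====
-- shared module helper: Python get_dependencies (recipes.get(recipe, []) = first match in the assoc list); Source B uses the identical helper
def get_dependencies (recipe : String) (recipes : List (String × List String)) : List String :=
  if recipe = "solid-fuel" then ["heavy-oil", "light-oil", "petroleum-gas"]
  else ((recipes.find? (fun p => p.1 == recipe)).map Prod.snd).getD []

-- all names a recursive call can ever be made on (used only to size the fuel)
def pvNames (recipes : List (String × List String)) : List String :=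
  recipes.flatMap Prod.snd ++ ["heavy-oil", "light-oil", "petroleum-gas"]

-- fueled transliteration of A: append the row, then the for-loop threads `data`
-- through the loop body (skip if the name is among the rows' heads, else recurse).
-- `some x ∈ acc.map (pyGet? · 0)` is Python's `x in [d[0] for d in data]` (none = IndexError on an empty row, excluded by Pre_).
def travA (recipes : List (String × List String)) : Nat → String → List (List String) → List (List String)
  | 0, _, data => data
  | n + 1, recipe, data =>
      (get_dependencies recipe recipes).foldl
        (fun acc x =>
          if some x ∈ acc.map (fun row => PySem.List.pyGet? row 0) then acc
          else travA recipes n x acc)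
        (data ++ [recipe :: get_dependencies recipe recipes])

-- the fuel (recursion depth) is generous: each nested call adds a fresh head out of pvNames
def traverse_list (recipe : String) (recipes : List (String × List String)) (data : List (List String)) : List (List String) :=
  travA recipes ((pvNames recipes).length + 2) recipe data

-- ===== PORT B =====
-- Source B's while-loop: pop a name off the stack, skip if in `seen`, else append its row,
-- mark it seen and push its dependencies reversed (the Python stack pops from the right,
-- so it is held here top-first: extend(reversed(ds)) = ds ++ st).
def loopB (recipes : List (String × List String)) : Nat → List String → PySem.Set String → List (List String) → List (List String)
  | 0, _, _, d => d
  | _ + 1, [], _, d => d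
  | n + 1, x :: st, seen, d =>
      if PySem.Set.contains seen x then loopB recipes n st seen d
      else
        loopB recipes n (get_dependencies x recipes ++ st) (PySem.Set.add seen x)
          (d ++ [x :: get_dependencies x recipes])

-- `{row[0] for row in data}`; `(pyGet? row 0).getD ""` is row[0] for the nonempty rows
-- guaranteed by Pre_ when this set is built (Python raises IndexError there otherwise)
def seedSeen (d : List (List String)) : PySem.Set String :=
  PySem.Set.ofList (d.map (fun row => (PySem.List.pyGet? row 0).getD ""))

def traverse_list_alt (recipe : String) (recipes : List (String × List String)) (data : List (List String)) : List (List String) :=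
  let deps := get_dependencies recipe recipes
  let d1 := data ++ [recipe :: deps]
  if deps = [] then d1
  else
    loopB recipes (((pvNames recipes).length + 4) * ((pvNames recipes).length + 4))
      deps (seedSeen d1) d1

-- ===== PRECONDITION & SPEC =====
-- Pre_ excludes exactly the inputs where Python A raises IndexError: an empty row in
-- `data` while the root recipe has dependencies (then `[d[0] for d in data]` is evaluated).
def Pre_traverse_list (recipe : String) (recipes : List (String × List String)) (data : List (List String)) : Prop :=
  get_dependencies recipe recipes = [] ∨ ∀ row ∈ data, row ≠ []
instance (recipe : String) (recipes : List (String × List String)) (data : List (List String)) : Decidable (Pre_traverse_list recipe recipes data) := by unfold Pre_traverse_list; infer_instance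
def pvWitness_traverse_list : String × (List (String × List String)) × List (List String) :=
  ("solid-fuel", [("heavy-oil", ["coal"])], [])
def Spec_traverse_list (recipe : String) (recipes : List (String × List String)) (data : List (List String)) (out : List (List String)) : Prop := out = traverse_list_alt recipe recipes data
instance (recipe : String) (recipes : List (String × List String)) (data : List (List String)) (out : List (List String)) : Decidable (Spec_traverse_list recipe recipes data out) := by unfold Spec_traverse_list; infer_instance

-- ===== CLAIM (what is proved, stated in full; the proofs are below) =====
def Claim_equal_traverse_list : Prop := ∀ (recipe : String) (recipes : List (String × List String)) (data : List (List String)), Dom_traverse_list recipe recipes data → Pre_traverse_list recipe recipes data → Spec_traverse_list recipe recipes data (traverse_list recipe recipes data)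

-- ===== LEMMAS AND PROOFS =====

-- A's loop body as a named step function (definitionally the lambda in travA)
def AStep (recipes : List (String × List String)) (n : Nat) (acc : List (List String)) (x : String) : List (List String) :=
  if some x ∈ acc.map (fun row => PySem.List.pyGet? row 0) then acc else travA recipes n x acc

theorem travA_succ (recipes : List (String × List String)) (n : Nat) (recipe : String) (data : List (List String)) :
    travA recipes (n + 1) recipe data =
      (get_dependencies recipe recipes).foldl (AStep recipes n) (data ++ [recipe :: get_dependencies recipe recipes]) := rfl

-- heads of the rows, as a finset
def headsF (data : List (List String)) : Finset String := (data.filterMap List.head?).toFinset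

-- the measure: names of pvNames not yet heading a row
def meas (recipes : List (String × List String)) (data : List (List String)) : Nat :=
  ((pvNames recipes).toFinset \ headsF data).card

theorem visited_iff (x : String) (data : List (List String)) :
    (some x ∈ data.map (fun row => PySem.List.pyGet? row 0)) ↔ x ∈ headsF data := by
  simp [headsF, List.mem_filterMap, PySem.List.pyGet?_zero, List.head?_eq_getElem?, eq_comm]

theorem deps_subset (x : String) (recipes : List (String × List String)) :
    ∀ y ∈ get_dependencies x recipes, y ∈ pvNames recipes := by
  intro y hy
  unfold get_dependencies at hy
  unfold pvNames
  split at hy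
  · simp_all
  · match hfind : recipes.find? (fun p => p.1 == x) with
    | none => simp [hfind] at hy
    | some p =>
      have hp := List.mem_of_find?_eq_some hfind
      simp [hfind] at hy
      exact List.mem_append_left _ (List.mem_flatMap.2 ⟨p, hp, hy⟩)

theorem deps_len (x : String) (recipes : List (String × List String)) :
    (get_dependencies x recipes).length ≤ (pvNames recipes).length + 3 := by
  unfold get_dependencies
  split
  · simp [pvNames]
  · cases hfind : recipes.find? (fun p => p.1 == x) with
    | none => simp
    | some p =>
      have hp := List.mem_of_find?_eq_some hfind
      have h3 : p.2.length ≤ (recipes.map (fun a => a.2.length)).sum :=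
        List.single_le_sum (fun _ _ => Nat.zero_le _) _ (List.mem_map_of_mem hp)
      simp [pvNames, List.length_append, List.length_flatMap]
      omega

-- travA and its loop only append rows
theorem grow_travA (recipes : List (String × List String)) :
    ∀ n r data, ∃ e, travA recipes n r data = data ++ e := by
  intro n
  induction n with
  | zero => exact fun r data => ⟨[], by simp [travA]⟩
  | succ n ih =>
    intro r data
    rw [travA_succ]
    have hfold : ∀ (st : List String) (d : List (List String)), ∃ e, st.foldl (AStep recipes n) d = d ++ e := by
      intro st
      induction st with
      | nil => exact fun d => ⟨[], by simp⟩
      | cons x st ihst =>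
        intro d
        simp only [List.foldl_cons, AStep]
        split
        · exact ihst d
        · obtain ⟨e1, he1⟩ := ih x d
          obtain ⟨e2, he2⟩ := ihst (travA recipes n x d)
          exact ⟨e1 ++ e2, by rw [he2, he1, List.append_assoc]⟩
    obtain ⟨e, he⟩ := hfold (get_dependencies r recipes) (data ++ [r :: get_dependencies r recipes])
    exact ⟨(r :: get_dependencies r recipes) :: e, by rw [he]; simp⟩

theorem grow_fold (recipes : List (String × List String)) (n : Nat) :
    ∀ (st : List String) (d : List (List String)), ∃ e, st.foldl (AStep recipes n) d = d ++ e := by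
  intro st
  induction st with
  | nil => exact fun d => ⟨[], by simp⟩
  | cons x st ihst =>
    intro d
    simp only [List.foldl_cons, AStep]
    split
    · exact ihst d
    · obtain ⟨e1, he1⟩ := grow_travA recipes n x d
      obtain ⟨e2, he2⟩ := ihst (travA recipes n x d)
      exact ⟨e1 ++ e2, by rw [he2, he1, List.append_assoc]⟩

theorem headsF_mono (d e : List (List String)) : headsF d ⊆ headsF (d ++ e) := by
  intro a ha
  simp only [headsF, List.filterMap_append, List.toFinset_append, Finset.mem_union]
  exact Or.inl ha

theorem meas_mono (recipes : List (String × List String)) (d e : List (List String)) :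
    meas recipes (d ++ e) ≤ meas recipes d :=
  Finset.card_le_card (Finset.sdiff_subset_sdiff (Finset.Subset.refl _) (headsF_mono d e))

theorem meas_fresh (recipes : List (String × List String)) (x : String) (row : List String)
    (d : List (List String)) (hx : x ∈ pvNames recipes) (hnx : x ∉ headsF d) :
    meas recipes (d ++ [x :: row]) + 1 = meas recipes d := by
  have h1 : headsF (d ++ [x :: row]) = insert x (headsF d) := by
    unfold headsF
    rw [List.filterMap_append, List.toFinset_append]
    have h2 : List.filterMap List.head? [x :: row] = [x] := rfl
    rw [h2]
    simp [Finset.union_singleton]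
  unfold meas
  rw [h1, Finset.sdiff_insert]
  rw [Finset.card_erase_of_mem (by simp [Finset.mem_sdiff, hnx, hx])]
  have : 0 < ((pvNames recipes).toFinset \ headsF d).card :=
    Finset.card_pos.2 ⟨x, by simp [Finset.mem_sdiff, hnx, hx]⟩
  omega

-- A's loop result does not depend on the fuel, as long as the fuel exceeds the measure
theorem A_irrel (recipes : List (String × List String)) :
    ∀ k (st : List String) (d : List (List String)) (n n' : Nat),
      meas recipes d ≤ k → (∀ x ∈ st, x ∈ pvNames recipes) →
      meas recipes d + 1 ≤ n → meas recipes d + 1 ≤ n' →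
      st.foldl (AStep recipes n) d = st.foldl (AStep recipes n') d := by
  intro k
  induction k with
  | zero =>
    intro st
    induction st with
    | nil => intro d n n' _ _ _ _; simp
    | cons x st ihst =>
      intro d n n' hk hsub hn hn'
      simp only [List.foldl_cons, AStep]
      split
      · exact ihst d n n' hk (fun y hy => hsub y (List.mem_cons_of_mem _ hy)) hn hn'
      · -- fresh head is impossible at measure 0
        exfalso
        rename_i hvis
        rw [visited_iff] at hvis
        have hx : x ∈ pvNames recipes := hsub x (List.mem_cons_self)
        have : 0 < meas recipes d :=
          Finset.card_pos.2 ⟨x, by simp [Finset.mem_sdiff, hvis, hx]⟩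
        omega
  | succ k ih =>
    intro st
    induction st with
    | nil => intro d n n' _ _ _ _; simp
    | cons x st ihst =>
      intro d n n' hk hsub hn hn'
      simp only [List.foldl_cons, AStep]
      split
      · exact ihst d n n' hk (fun y hy => hsub y (List.mem_cons_of_mem _ hy)) hn hn'
      · rename_i hvis
        rw [visited_iff] at hvis
        have hx : x ∈ pvNames recipes := hsub x (List.mem_cons_self)
        obtain ⟨a, rfl⟩ : ∃ a, n = a + 1 := ⟨n - 1, by omega⟩
        obtain ⟨b, rfl⟩ : ∃ b, n' = b + 1 := ⟨n' - 1, by omega⟩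
        set d1 := d ++ [x :: get_dependencies x recipes] with hd1
        have hmeas1 : meas recipes d1 + 1 = meas recipes d := meas_fresh recipes x _ d hx hvis
        have hdeps : ∀ y ∈ get_dependencies x recipes, y ∈ pvNames recipes := deps_subset x recipes
        have hinner : travA recipes (a + 1) x d = travA recipes (b + 1) x d := by
          rw [travA_succ, travA_succ, ← hd1]
          exact ih _ d1 a b (by omega) hdeps (by omega) (by omega)
        rw [hinner]
        obtain ⟨e', he'⟩ : ∃ e', travA recipes (b + 1) x d = d1 ++ e' := by
          rw [travA_succ, ← hd1]
          exact grow_fold recipes b (get_dependencies x recipes) d1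
        have hmeas3 : meas recipes (travA recipes (b + 1) x d) ≤ meas recipes d1 := by
          rw [he']; exact meas_mono recipes d1 e'
        exact ihst _ (a + 1) (b + 1) (by omega)
          (fun y hy => hsub y (List.mem_cons_of_mem _ hy))
          (by omega) (by omega)

-- the `seen` set tracks exactly the row heads of `d`
def SeenInv (seen : PySem.Set String) (d : List (List String)) : Prop :=
  ∀ y : String, y ∈ seen ↔ some y ∈ d.map (fun row => PySem.List.pyGet? row 0)

theorem seen_inv_step (seen : PySem.Set String) (d : List (List String)) (x : String) (row : List String)
    (h : SeenInv seen d) : SeenInv (PySem.Set.add seen x) (d ++ [x :: row]) := by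
  intro y
  rw [PySem.Set.mem_add, h y]
  simp [PySem.List.pyGet?_zero, or_comm]

theorem seed_inv (d : List (List String)) (h : ∀ row ∈ d, row ≠ []) : SeenInv (seedSeen d) d := by
  intro y
  rw [seedSeen, PySem.Set.mem_ofList]
  induction d with
  | nil => simp
  | cons r l ih =>
    have hr := h r List.mem_cons_self
    match r with
    | [] => exact absurd rfl hr
    | a :: t =>
      have ih' := ih (fun row hrow => h row (List.mem_cons_of_mem _ hrow))
      simp only [List.map_cons, List.mem_cons, PySem.List.pyGet?_zero,
        List.getElem?_cons_zero, Option.getD_some, Option.some.injEq] at ih' ⊢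
      rw [ih']

-- MAIN: B's explicit-stack loop with the `seen` set computes A's for-loop, given enough fuel on both sides
theorem main_lemma (recipes : List (String × List String)) :
    ∀ k (st : List String) (seen : PySem.Set String) (d : List (List String)) (n m : Nat),
      meas recipes d ≤ k → (∀ x ∈ st, x ∈ pvNames recipes) →
      SeenInv seen d →
      meas recipes d + 1 ≤ n →
      st.length + ((pvNames recipes).length + 4) * meas recipes d ≤ m →
      st.foldl (AStep recipes n) d = loopB recipes m st seen d := by
  intro k
  induction k with
  | zero =>
    intro st
    induction st with
    | nil =>
      intro seen d n m _ _ _ _ _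
      cases m <;> simp [loopB]
    | cons x st ihst =>
      intro seen d n m hk hsub hseen hn hm
      obtain ⟨m', rfl⟩ : ∃ m', m = m' + 1 := ⟨m - 1, by simp only [List.length_cons] at hm; omega⟩
      simp only [List.foldl_cons, AStep, loopB]
      have hcontains : PySem.Set.contains seen x = true ↔ some x ∈ d.map (fun row => PySem.List.pyGet? row 0) := by
        rw [← hseen x]; exact List.contains_iff_mem
      by_cases hv : some x ∈ d.map (fun row => PySem.List.pyGet? row 0)
      · rw [if_pos hv, if_pos (hcontains.2 hv)]
        exact ihst seen d n m' hk (fun y hy => hsub y (List.mem_cons_of_mem _ hy)) hseen hn (by simp only [List.length_cons] at hm; omega)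
      · exfalso
        rw [visited_iff] at hv
        have hx : x ∈ pvNames recipes := hsub x (List.mem_cons_self)
        have : 0 < meas recipes d :=
          Finset.card_pos.2 ⟨x, by simp [Finset.mem_sdiff, hv, hx]⟩
        omega
  | succ k ih =>
    intro st
    induction st with
    | nil =>
      intro seen d n m _ _ _ _ _
      cases m <;> simp [loopB]
    | cons x st ihst =>
      intro seen d n m hk hsub hseen hn hm
      obtain ⟨m', rfl⟩ : ∃ m', m = m' + 1 := ⟨m - 1, by simp only [List.length_cons] at hm; omega⟩
      simp only [List.foldl_cons, AStep, loopB]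
      have hcontains : PySem.Set.contains seen x = true ↔ some x ∈ d.map (fun row => PySem.List.pyGet? row 0) := by
        rw [← hseen x]; exact List.contains_iff_mem
      by_cases hv : some x ∈ d.map (fun row => PySem.List.pyGet? row 0)
      · rw [if_pos hv, if_pos (hcontains.2 hv)]
        exact ihst seen d n m' hk (fun y hy => hsub y (List.mem_cons_of_mem _ hy)) hseen hn (by simp only [List.length_cons] at hm; omega)
      · rw [if_neg hv, if_neg (fun hc => hv (hcontains.1 hc))]
        have hvis := hv
        rw [visited_iff] at hvis
        have hx : x ∈ pvNames recipes := hsub x (List.mem_cons_self)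
        set deps := get_dependencies x recipes with hdepsdef
        set d1 := d ++ [x :: deps] with hd1
        have hmeas1 : meas recipes d1 + 1 = meas recipes d := meas_fresh recipes x _ d hx hvis
        have hdeps : ∀ y ∈ deps, y ∈ pvNames recipes := deps_subset x recipes
        have hsub' : ∀ y ∈ deps ++ st, y ∈ pvNames recipes := by
          intro y hy
          rcases List.mem_append.1 hy with h | h
          · exact hdeps y h
          · exact hsub y (List.mem_cons_of_mem _ h)
        have hL : deps.length ≤ (pvNames recipes).length + 3 := deps_len x recipes
        have hseen' : SeenInv (PySem.Set.add seen x) d1 := seen_inv_step seen d x deps hseen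
        -- apply the main IH at the smaller measure on the extended stack
        have hIH : (deps ++ st).foldl (AStep recipes n) d1 = loopB recipes m' (deps ++ st) (PySem.Set.add seen x) d1 := by
          apply ih (deps ++ st) (PySem.Set.add seen x) d1 n m' (by omega) hsub' hseen' (by omega)
          have : (deps ++ st).length = deps.length + st.length := by simp
          have hexp : ((pvNames recipes).length + 4) * meas recipes d
              = ((pvNames recipes).length + 4) * meas recipes d1 + ((pvNames recipes).length + 4) := by
            rw [← hmeas1]; ring
          simp at hm
          omega
        rw [← hIH, List.foldl_append]
        -- align A's inner fuel (n-1) with n via fuel irrelevance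
        obtain ⟨a, rfl⟩ : ∃ a, n = a + 1 := ⟨n - 1, by omega⟩
        rw [travA_succ, ← hd1]
        congr 1
        exact A_irrel recipes (meas recipes d1) deps d1 a (a + 1) (le_refl _) hdeps (by omega) (by omega)

theorem card_meas_le (recipes : List (String × List String)) (d : List (List String)) :
    meas recipes d ≤ (pvNames recipes).length :=
  le_trans (Finset.card_le_card (Finset.sdiff_subset)) (List.toFinset_card_le _)

-- ===== VERDICT (by name: the statement is the Claim_ definition above) =====
theorem traverse_list_spec : Claim_equal_traverse_list := by
  intro recipe recipes data _ hpre
  unfold Spec_traverse_list traverse_list traverse_list_alt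
  rw [travA_succ]
  by_cases hdep : get_dependencies recipe recipes = []
  · simp [hdep]
  · rw [if_neg hdep]
    have hrows : ∀ row ∈ data, row ≠ [] := by
      rcases hpre with h | h
      · exact absurd h hdep
      · exact h
    set L := (pvNames recipes).length with hL
    obtain ⟨F, hF⟩ : ∃ F, (L + 4) * (L + 4) = F + 1 := ⟨(L + 4) * (L + 4) - 1, by have h0 : 0 < (L + 4) * (L + 4) := Nat.mul_pos (by omega) (by omega); omega⟩
    rw [hF]
    set d1 := data ++ [recipe :: get_dependencies recipe recipes] with hd1
    have hrows1 : ∀ row ∈ d1, row ≠ [] := by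
      intro row hrow
      rcases List.mem_append.1 hrow with h | h
      · exact hrows row h
      · simp only [List.mem_singleton] at h; subst h; simp
    have hmeas : meas recipes d1 ≤ L := card_meas_le recipes d1
    have hlen : (get_dependencies recipe recipes).length ≤ L + 3 := deps_len recipe recipes
    apply main_lemma recipes (meas recipes d1) _ (seedSeen d1) d1 (L + 1) (F + 1) (le_refl _)
      (deps_subset recipe recipes) (seed_inv d1 hrows1) (by omega)
    have hb : (get_dependencies recipe recipes).length + ((pvNames recipes).length + 4) * meas recipes d1
        ≤ (L + 3) + (L + 4) * L := by
      have h1 : (L + 4) * meas recipes d1 ≤ (L + 4) * L := Nat.mul_le_mul_left _ hmeas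
      rw [← hL]
      omega
    have hc : (L + 3) + (L + 4) * L + 1 ≤ (L + 4) * (L + 4) := by nlinarith
    omega
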